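-- pv_equiv track=rewrite | github.com/Arnoldisprobablycrazy/jobassist | python-service/indices/cover_letter_generator.py | _extract_optimized_letter
-- ===== SOURCE A (Python) =====
-- def _extract_optimized_letter(response: str) -> str:
--     """Extract optimized cover letter from AI response."""
--     # Look for the optimized version in the response
--     # This is a simplified extraction - in production, use more sophisticated parsing
--     lines = response.split('\n')
--     optimized_lines = []
--     in_letter_section = False
--
--     for line in lines:
--         if "optimized" in line.lower() or "improved" in line.lower():
--             in_letter_section = True
--             continue
--         elif in_letter_section and line.strip():
--             optimized_lines.append(line)
--
--     if optimized_lines: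
--         return '\n'.join(optimized_lines)
--     else:
--         return "Optimized version not available in current response format."
-- ===== SOURCE B (Python) =====
-- def _extract_optimized_letter(response: str) -> str:
--     default = "Optimized version not available in current response format."
--     lines = response.split('\n')
--
--     def _is_marker(line):
--         low = line.lower()
--         return "optimized" in low or "improved" in low
--
--     start = next((i for i, line in enumerate(lines) if _is_marker(line)), None)
--     if start is None:
--         return default
--     kept = [line for line in lines[start + 1:]
--             if line.strip() and not _is_marker(line)]
--     return '\n'.join(kept) if kept else default
-- ===== Notes on version B (the rewrite author's own statement) =====
-- stated objective: alternative
-- what changed: Replaces A's single stateful boolean-flag loop with a locate-then-filter decomposition: first find the first marker line ('optimized'/'improved'), then build the kept lines from the suffix with one filter (non-blank and non-marker), joining or falling back to the default.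
import Mathlib
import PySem

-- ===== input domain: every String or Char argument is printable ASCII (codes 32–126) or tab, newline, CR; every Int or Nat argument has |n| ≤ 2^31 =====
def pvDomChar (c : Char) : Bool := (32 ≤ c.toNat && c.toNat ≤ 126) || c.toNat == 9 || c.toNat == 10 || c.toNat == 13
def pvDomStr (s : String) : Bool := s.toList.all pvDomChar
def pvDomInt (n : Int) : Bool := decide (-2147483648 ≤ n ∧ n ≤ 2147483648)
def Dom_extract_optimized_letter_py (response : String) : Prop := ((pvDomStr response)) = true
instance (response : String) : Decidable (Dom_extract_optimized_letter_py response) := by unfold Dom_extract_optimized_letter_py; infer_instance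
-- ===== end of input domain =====

-- B re-implements A as locate-the-marker-line then one filter over the suffix; same value on all inputs (objective: alternative decomposition).

-- ===== PORT A =====
-- A: one pass with a boolean flag; marker lines flip the flag and are skipped, non-blank lines after it are collected.
def extract_optimized_letter_py (response : String) : String :=
  let lines := ((PySem.Str.split? response "\n").getD [])
  let st := lines.foldl
    (fun (st : Bool × List String) line =>
      if PySem.Str.isIn "optimized" (PySem.Str.lower line) || PySem.Str.isIn "improved" (PySem.Str.lower line) then
        (true, st.2)
      else if st.1 && !(PySem.Str.strip line == "") then
        (st.1, st.2 ++ [line])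
      else st)
    (false, [])
  if st.2 ≠ [] then PySem.Str.join "\n" st.2
  else "Optimized version not available in current response format."

-- ===== PORT B =====
-- B helper: is this a marker line?
def pvMarker (line : String) : Bool :=
  let low := PySem.Str.lower line
  PySem.Str.isIn "optimized" low || PySem.Str.isIn "improved" low

-- B helper: the suffix of lines strictly after the first marker line (none if no marker).
def pvAfterMarker : List String → Option (List String)
  | [] => none
  | l :: ls => if pvMarker l then some ls else pvAfterMarker ls

def extract_optimized_letter_py_alt (response : String) : String :=
  let lines := ((PySem.Str.split? response "\n").getD [])
  match pvAfterMarker lines with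
  | none => "Optimized version not available in current response format."
  | some rest =>
    let kept := rest.filter (fun l => !(PySem.Str.strip l == "") && !pvMarker l)
    if kept ≠ [] then PySem.Str.join "\n" kept
    else "Optimized version not available in current response format."

-- ===== PRECONDITION & SPEC =====
def Spec_extract_optimized_letter_py (response : String) (out : String) : Prop := out = extract_optimized_letter_py_alt response
instance (response : String) (out : String) : Decidable (Spec_extract_optimized_letter_py response out) := by unfold Spec_extract_optimized_letter_py; infer_instance

-- ===== CLAIM (what is proved, stated in full; the proofs are below) =====
def Claim_equal_extract_optimized_letter_py : Prop := ∀ (response : String), Dom_extract_optimized_letter_py response → Spec_extract_optimized_letter_py response (extract_optimized_letter_py response)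

-- ===== LEMMAS AND PROOFS =====
-- A's loop body, named for the proofs.
def pvStepA (st : Bool × List String) (line : String) : Bool × List String :=
  if PySem.Str.isIn "optimized" (PySem.Str.lower line) || PySem.Str.isIn "improved" (PySem.Str.lower line) then
    (true, st.2)
  else if st.1 && !(PySem.Str.strip line == "") then
    (st.1, st.2 ++ [line])
  else st

lemma pvStepA_marker (st : Bool × List String) (line : String) (h : pvMarker line = true) :
    pvStepA st line = (true, st.2) := by
  have hkw : (PySem.Str.isIn "optimized" (PySem.Str.lower line) || PySem.Str.isIn "improved" (PySem.Str.lower line)) = true := by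
    simpa [pvMarker] using h
  simp only [pvStepA, hkw]
  rfl

lemma pvLoopTrue (ls : List String) (acc : List String) :
    ls.foldl pvStepA (true, acc) =
      (true, acc ++ ls.filter (fun l => !(PySem.Str.strip l == "") && !pvMarker l)) := by
  induction ls generalizing acc with
  | nil => simp
  | cons l ls ih =>
    by_cases hm : pvMarker l = true
    · simp only [List.foldl_cons, pvStepA_marker _ _ hm, List.filter_cons, hm]
      simpa using ih acc
    · have hm' : pvMarker l = false := by simpa using hm
      have hkw : (PySem.Str.isIn "optimized" (PySem.Str.lower l) || PySem.Str.isIn "improved" (PySem.Str.lower l)) = false := by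
        simpa [pvMarker] using hm'
      by_cases hs : PySem.Str.strip l = ""
      · simp only [List.foldl_cons, pvStepA, hkw, List.filter_cons, hs, hm']
        simpa using ih acc
      · have hs' : (PySem.Str.strip l == "") = false := by simpa using hs
        simp only [List.foldl_cons, pvStepA, hkw, List.filter_cons, hs', hm']
        simpa using ih (acc ++ [l])

lemma pvLoopFalse (ls : List String) :
    ls.foldl pvStepA (false, []) =
      match pvAfterMarker ls with
      | none => (false, [])
      | some rest => (true, rest.filter (fun l => !(PySem.Str.strip l == "") && !pvMarker l)) := by
  induction ls with
  | nil => simp [pvAfterMarker]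
  | cons l ls ih =>
    by_cases hm : pvMarker l = true
    · simp only [List.foldl_cons, pvStepA_marker _ _ hm, pvAfterMarker, hm, if_true]
      simpa using pvLoopTrue ls []
    · have hm' : pvMarker l = false := by simpa using hm
      have hkw : (PySem.Str.isIn "optimized" (PySem.Str.lower l) || PySem.Str.isIn "improved" (PySem.Str.lower l)) = false := by
        simpa [pvMarker] using hm'
      simp only [List.foldl_cons, pvStepA, hkw, pvAfterMarker, hm']
      simpa using ih

-- ===== VERDICT (by name: the statement is the Claim_ definition above) =====
theorem extract_optimized_letter_py_spec : Claim_equal_extract_optimized_letter_py := by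
  intro response _
  unfold Spec_extract_optimized_letter_py
  show extract_optimized_letter_py response = extract_optimized_letter_py_alt response
  unfold extract_optimized_letter_py extract_optimized_letter_py_alt
  have h := pvLoopFalse (((PySem.Str.split? response "\n").getD []))
  simp only [show (fun (st : Bool × List String) line =>
      if PySem.Str.isIn "optimized" (PySem.Str.lower line) || PySem.Str.isIn "improved" (PySem.Str.lower line) then
        (true, st.2)
      else if st.1 && !(PySem.Str.strip line == "") then
        (st.1, st.2 ++ [line])
      else st) = pvStepA from rfl]
  rw [h]
  cases pvAfterMarker (((PySem.Str.split? response "\n").getD [])) <;> simp
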